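-- pv_equiv track=rewrite | github.com/chikocosta/sitemente | sistema_planejamento_completo/src/routes/planejamento.py | adaptar_recursos_plano
-- ===== SOURCE A (Python) =====
-- def adaptar_recursos_plano(recursos):
--     """Adapta recursos disponíveis ao plano"""
--     recursos_adaptados = {
--         "basicos": ["Quadro", "Giz/Marcador", "Papel", "Lápis"],
--         "tecnologicos": [],
--         "manipulaveis": [],
--         "artisticos": []
--     }
--
--     for recurso in recursos:
--         if recurso in ["computador", "tablet", "projetor"]:
--             recursos_adaptados["tecnologicos"].append(recurso)
--         elif recurso in ["blocos", "jogos", "quebra-cabeca"]: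
--             recursos_adaptados["manipulaveis"].append(recurso)
--         elif recurso in ["tinta", "papel", "pinceis", "massinha"]:
--             recursos_adaptados["artisticos"].append(recurso)
--
--     return recursos_adaptados
-- ===== SOURCE B (Python) =====
-- _CATEGORIAS = {
--     "tecnologicos": ("computador", "tablet", "projetor"),
--     "manipulaveis": ("blocos", "jogos", "quebra-cabeca"),
--     "artisticos": ("tinta", "papel", "pinceis", "massinha"),
-- }
--
-- def adaptar_recursos_plano(recursos):
--     """Adapta recursos disponíveis ao plano"""
--     resultado = {"basicos": ["Quadro", "Giz/Marcador", "Papel", "Lápis"]}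
--     for categoria, membros in _CATEGORIAS.items():
--         resultado[categoria] = [r for r in recursos if r in membros]
--     return resultado
-- ===== Notes on version B (the rewrite author's own statement) =====
-- stated objective: idiomatic
-- what changed: Replaces the single loop with an if/elif membership chain mutating a dict by a declarative category table iterated once, building each category's list with one filtering comprehension over the input (relies on the three member sets being disjoint so per-category order is unchanged).
import Mathlib
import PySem

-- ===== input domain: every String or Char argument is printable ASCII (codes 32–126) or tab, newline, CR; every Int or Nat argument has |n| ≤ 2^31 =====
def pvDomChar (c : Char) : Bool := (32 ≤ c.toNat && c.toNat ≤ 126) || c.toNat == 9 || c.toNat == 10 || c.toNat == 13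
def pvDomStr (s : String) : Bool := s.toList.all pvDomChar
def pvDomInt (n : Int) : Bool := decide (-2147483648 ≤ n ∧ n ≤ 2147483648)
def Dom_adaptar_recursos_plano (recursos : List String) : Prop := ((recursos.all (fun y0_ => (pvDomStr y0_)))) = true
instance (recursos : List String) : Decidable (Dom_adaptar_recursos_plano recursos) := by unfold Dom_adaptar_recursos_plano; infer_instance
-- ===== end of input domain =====

-- B replaces A's if/elif chain mutating a dict by a category→members table with one filtering pass per category (idiomatic, same cost).


-- ===== PORT A =====
-- the loop of A: walks recursos once, appending to the three mutable category lists
def adaptarA_loop (recursos : List String) (tec man art : List String) :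
    List String × List String × List String :=
  match recursos with
  | [] => (tec, man, art)
  | r :: rest =>
    if r ∈ ["computador", "tablet", "projetor"] then
      adaptarA_loop rest (tec ++ [r]) man art
    else if r ∈ ["blocos", "jogos", "quebra-cabeca"] then
      adaptarA_loop rest tec (man ++ [r]) art
    else if r ∈ ["tinta", "papel", "pinceis", "massinha"] then
      adaptarA_loop rest tec man (art ++ [r])
    else
      adaptarA_loop rest tec man art

def adaptar_recursos_plano (recursos : List String) : List (String × List String) :=
  let s := adaptarA_loop recursos [] [] []
  [("basicos", ["Quadro", "Giz/Marcador", "Papel", "Lápis"]),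
   ("tecnologicos", s.1), ("manipulaveis", s.2.1), ("artisticos", s.2.2)]

-- ===== PORT B =====
def adaptarB_categorias : List (String × List String) :=
  [("tecnologicos", ["computador", "tablet", "projetor"]),
   ("manipulaveis", ["blocos", "jogos", "quebra-cabeca"]),
   ("artisticos", ["tinta", "papel", "pinceis", "massinha"])]

def adaptar_recursos_plano_alt (recursos : List String) : List (String × List String) :=
  ("basicos", ["Quadro", "Giz/Marcador", "Papel", "Lápis"]) ::
    adaptarB_categorias.map (fun p => (p.1, recursos.filter (fun r => p.2.contains r)))

-- ===== PRECONDITION & SPEC =====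
def Spec_adaptar_recursos_plano (recursos : List String) (out : List (String × List String)) : Prop := out = adaptar_recursos_plano_alt recursos
instance (recursos : List String) (out : List (String × List String)) : Decidable (Spec_adaptar_recursos_plano recursos out) := by unfold Spec_adaptar_recursos_plano; infer_instance

-- ===== CLAIM (what is proved, stated in full; the proofs are below) =====
def Claim_equal_adaptar_recursos_plano : Prop := ∀ (recursos : List String), Dom_adaptar_recursos_plano recursos → Spec_adaptar_recursos_plano recursos (adaptar_recursos_plano recursos)

-- ===== LEMMAS AND PROOFS =====

lemma adaptarA_loop_eq (recursos : List String) (tec man art : List String) :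
    adaptarA_loop recursos tec man art =
      (tec ++ recursos.filter (fun r => ["computador", "tablet", "projetor"].contains r),
       man ++ recursos.filter (fun r => ["blocos", "jogos", "quebra-cabeca"].contains r),
       art ++ recursos.filter (fun r => ["tinta", "papel", "pinceis", "massinha"].contains r)) := by
  induction recursos generalizing tec man art with
  | nil => simp [adaptarA_loop]
  | cons r rest ih =>
    by_cases h1 : r ∈ ["computador", "tablet", "projetor"]
    · fin_cases h1 <;> simp [adaptarA_loop, ih, List.filter_cons]
    · by_cases h2 : r ∈ ["blocos", "jogos", "quebra-cabeca"]
      · fin_cases h2 <;> simp [adaptarA_loop, ih, List.filter_cons] <;>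
          simp_all
      · by_cases h3 : r ∈ ["tinta", "papel", "pinceis", "massinha"]
        · fin_cases h3 <;> simp [adaptarA_loop, ih, List.filter_cons] <;>
            simp_all
        · simp only [List.mem_cons, List.mem_singleton, List.not_mem_nil, or_false] at h1 h2 h3
          push_neg at h1 h2 h3
          simp [adaptarA_loop, h1, h2, h3, ih, List.filter_cons,
                h1.1, h1.2.1, h1.2.2, h2.1, h2.2.1, h2.2.2,
                h3.1, h3.2.1, h3.2.2.1, h3.2.2.2]

-- ===== VERDICT (by name: the statement is the Claim_ definition above) =====
theorem adaptar_recursos_plano_spec : Claim_equal_adaptar_recursos_plano := by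
  intro recursos _
  unfold Spec_adaptar_recursos_plano adaptar_recursos_plano adaptar_recursos_plano_alt adaptarB_categorias
  simp [adaptarA_loop_eq]
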